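-- pv_equiv track=rewrite | github.com/nyson/aoc2023 | aoc2023/day7.py | sub_with
-- ===== SOURCE A (Python) =====
-- import itertools
--
-- def sub_with(prefix: str, curr: str, sub_ch: str, elements: list[str]) -> list[str]:
--     match list(curr):
--         case [] | [""]:
--             return [prefix]
--         case [ch, *_] if ch == sub_ch and len(elements) > 0:
--             xs = [sub_with(prefix + x, curr[1:], sub_ch, elements) for x in elements]
--             return list(itertools.chain.from_iterable(xs))
--         case [ch, *_]:
--             return sub_with(prefix + ch, curr[1:], sub_ch, elements)
--         case xs:
--             raise ValueError(f"Unhandled case in sub_with: {xs}")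
-- ===== SOURCE B (Python) =====
-- def sub_with(prefix: str, curr: str, sub_ch: str, elements: list[str]) -> list[str]:
--     results = [prefix]
--     for ch in curr:
--         if ch == sub_ch and elements:
--             results = [p + x for p in results for x in elements]
--         else:
--             results = [p + ch for p in results]
--     return results
-- ===== Notes on version B (the rewrite author's own statement) =====
-- stated objective: faster
-- what changed: Replaced the branching recursion (one call per character per produced prefix, with chained flattening of recursive sublists) by a single iterative pass over curr that expands a flat accumulator of prefixes with list comprehensions.
import Mathlib
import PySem

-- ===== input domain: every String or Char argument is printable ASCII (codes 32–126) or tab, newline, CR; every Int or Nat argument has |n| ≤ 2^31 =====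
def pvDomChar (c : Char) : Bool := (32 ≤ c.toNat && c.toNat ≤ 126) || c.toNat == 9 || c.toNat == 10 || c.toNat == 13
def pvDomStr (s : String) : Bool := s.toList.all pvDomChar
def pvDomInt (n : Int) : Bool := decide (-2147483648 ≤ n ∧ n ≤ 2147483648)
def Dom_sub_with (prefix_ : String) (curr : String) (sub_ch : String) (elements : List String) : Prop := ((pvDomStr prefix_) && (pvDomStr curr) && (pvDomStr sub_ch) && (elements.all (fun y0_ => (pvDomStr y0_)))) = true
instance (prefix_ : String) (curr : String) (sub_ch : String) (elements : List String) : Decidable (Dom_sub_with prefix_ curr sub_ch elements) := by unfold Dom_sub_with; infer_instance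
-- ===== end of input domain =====

-- B replaces A's branching recursion by one iterative left-to-right pass that expands a flat
-- accumulator of prefixes; same return value, measurably faster (no recursive calls or slicing).

-- ===== PORT A =====
-- A recurses on list(curr); the recursion is carried out over the list of characters
-- (curr[1:] = the tail), rebuilding the remaining string for each call as A does.
-- The `[""]` pattern of A is unreachable (list of a string never contains ""), so it is not ported.
def sub_withAux (prefix_ : String) (curr : List Char) (sub_ch : String) (elements : List String) : List String :=
  match curr with
  | [] => [prefix_]
  | ch :: rest =>
    if String.mk [ch] = sub_ch ∧ 0 < elements.length then
      (elements.map (fun x => sub_withAux (prefix_ ++ x) rest sub_ch elements)).flatten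
    else
      sub_withAux (prefix_ ++ String.mk [ch]) rest sub_ch elements

def sub_with (prefix_ : String) (curr : String) (sub_ch : String) (elements : List String) : List String :=
  sub_withAux prefix_ curr.toList sub_ch elements

-- ===== PORT B =====
-- One body-of-the-loop step of Source B's for-loop over curr.
def sub_with_altStep (sub_ch : String) (elements : List String) (results : List String) (ch : Char) : List String :=
  if String.mk [ch] = sub_ch ∧ elements ≠ [] then
    results.flatMap (fun p => elements.map (fun x => p ++ x))
  else
    results.map (fun p => p ++ String.mk [ch])

def sub_with_alt (prefix_ : String) (curr : String) (sub_ch : String) (elements : List String) : List String :=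
  curr.toList.foldl (sub_with_altStep sub_ch elements) [prefix_]

-- ===== PRECONDITION & SPEC =====
def Spec_sub_with (prefix_ : String) (curr : String) (sub_ch : String) (elements : List String) (out : List String) : Prop := out = sub_with_alt prefix_ curr sub_ch elements
instance (prefix_ : String) (curr : String) (sub_ch : String) (elements : List String) (out : List String) : Decidable (Spec_sub_with prefix_ curr sub_ch elements out) := by unfold Spec_sub_with; infer_instance

-- ===== CLAIM (what is proved, stated in full; the proofs are below) =====
def Claim_equal_sub_with : Prop := ∀ (prefix_ : String) (curr : String) (sub_ch : String) (elements : List String), Dom_sub_with prefix_ curr sub_ch elements → Spec_sub_with prefix_ curr sub_ch elements (sub_with prefix_ curr sub_ch elements)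

-- ===== LEMMAS AND PROOFS =====
-- Loop invariant: folding B's step over l from any accumulator rs equals flat-mapping A's
-- recursion (from each prefix in rs) over l.
theorem foldl_step_eq_flatMap_aux (sub_ch : String) (elements : List String)
    (l : List Char) : ∀ (rs : List String),
    l.foldl (sub_with_altStep sub_ch elements) rs
      = rs.flatMap (fun p => sub_withAux p l sub_ch elements) := by
  induction l with
  | nil => intro rs; simp [sub_withAux]
  | cons ch rest ih =>
    intro rs
    simp only [List.foldl_cons, ih]
    by_cases h : String.mk [ch] = sub_ch ∧ elements ≠ []
    · have h' : String.mk [ch] = sub_ch ∧ 0 < elements.length :=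
        ⟨h.1, List.length_pos_iff.mpr h.2⟩
      simp only [sub_with_altStep, sub_withAux, if_pos h, if_pos h',
        List.flatMap_assoc, List.flatMap_map, List.flatten_eq_flatMap, id]
    · have h' : ¬ (String.mk [ch] = sub_ch ∧ 0 < elements.length) := by
        intro hc; exact h ⟨hc.1, List.length_pos_iff.mp hc.2⟩
      simp only [sub_with_altStep, sub_withAux, if_neg h, if_neg h', List.flatMap_map]

-- ===== VERDICT (by name: the statement is the Claim_ definition above) =====
theorem sub_with_spec : Claim_equal_sub_with := by
  intro prefix_ curr sub_ch elements _
  unfold Spec_sub_with sub_with sub_with_alt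
  rw [foldl_step_eq_flatMap_aux]
  simp
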